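-- pv_equiv track=rewrite | github.com/LazyOvosc/LNU_AlgorithmsTheory | Task7/Task5.py | smart_print
-- ===== SOURCE A (Python) =====
-- def smart_print(lst, pos: int):
--     res = ''
--     for i in range(len(lst)):
--         if i == pos:
--             res += '\033[31m' + str(lst[i]) + '\033[0m'  # Add ANSI escape sequence for red color
--         else:
--             res += str(lst[i])
--     return res
-- ===== SOURCE B (Python) =====
-- def smart_print(lst, pos: int):
--     if 0 <= pos < len(lst):
--         return (''.join(map(str, lst[:pos]))
--                 + '\033[31m' + str(lst[pos]) + '\033[0m'
--                 + ''.join(map(str, lst[pos + 1:])))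
--     return ''.join(map(str, lst))
-- ===== Notes on version B (the rewrite author's own statement) =====
-- stated objective: alternative
-- what changed: B slices the list into prefix / highlighted element / suffix and joins each segment (falling back to one join when pos is out of range), instead of A's index loop that tests i == pos on every iteration and grows the string by repeated concatenation.
import Mathlib
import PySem

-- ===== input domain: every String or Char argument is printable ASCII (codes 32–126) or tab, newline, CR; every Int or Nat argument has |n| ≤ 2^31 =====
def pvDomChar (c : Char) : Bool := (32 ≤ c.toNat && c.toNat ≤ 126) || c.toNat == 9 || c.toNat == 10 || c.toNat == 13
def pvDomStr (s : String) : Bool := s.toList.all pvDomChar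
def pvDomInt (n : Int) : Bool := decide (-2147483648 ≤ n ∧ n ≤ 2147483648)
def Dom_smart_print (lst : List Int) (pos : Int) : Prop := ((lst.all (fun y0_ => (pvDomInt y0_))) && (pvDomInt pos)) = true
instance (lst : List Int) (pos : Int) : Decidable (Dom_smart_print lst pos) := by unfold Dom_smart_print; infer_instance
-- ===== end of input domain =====

-- B slices the list into prefix / highlighted element / suffix (when pos is in range) and
-- joins each segment, instead of testing i == pos on every iteration of an index loop.

-- ===== PORT A =====
-- literal port of A: index loop over range(len(lst)), if i == pos wrap in ANSI codes;
-- lst[i] with 0 ≤ i < len is always in range, so pyGetD with default 0 is exact here.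
def smart_print (lst : List Int) (pos : Int) : String :=
  (PySem.List.pyRange 0 lst.length 1).foldl
    (fun res i =>
      if i = pos then
        res ++ ("\x1b[31m" ++ PySem.Int.toStr (PySem.List.pyGetD lst i 0) ++ "\x1b[0m")
      else
        res ++ PySem.Int.toStr (PySem.List.pyGetD lst i 0)) ""

-- ===== PORT B =====
-- literal port of B: if 0 <= pos < len(lst): join(map(str, lst[:pos])) + red + str(lst[pos]) + reset
-- + join(map(str, lst[pos+1:])); else join(map(str, lst)).  lst[pos] under the guard is in range,
-- so pyGetD is exact; slices via PySem.List.slice.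
def smart_print_alt (lst : List Int) (pos : Int) : String :=
  if 0 ≤ pos ∧ pos < (lst.length : Int) then
    PySem.Str.join "" ((PySem.List.slice lst none (some pos)).map PySem.Int.toStr)
    ++ ("\x1b[31m" ++ PySem.Int.toStr (PySem.List.pyGetD lst pos 0) ++ "\x1b[0m")
    ++ PySem.Str.join "" ((PySem.List.slice lst (some (pos + 1)) none).map PySem.Int.toStr)
  else
    PySem.Str.join "" (lst.map PySem.Int.toStr)

-- ===== PRECONDITION & SPEC =====
def Spec_smart_print (lst : List Int) (pos : Int) (out : String) : Prop := out = smart_print_alt lst pos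
instance (lst : List Int) (pos : Int) (out : String) : Decidable (Spec_smart_print lst pos out) := by unfold Spec_smart_print; infer_instance

-- ===== CLAIM (what is proved, stated in full; the proofs are below) =====
def Claim_equal_smart_print : Prop := ∀ (lst : List Int) (pos : Int), Dom_smart_print lst pos → Spec_smart_print lst pos (smart_print lst pos)

-- ===== LEMMAS AND PROOFS =====

-- ''.join(a :: t) = a ++ ''.join(t)
theorem join_empty_cons (a : String) (t : List String) :
    PySem.Str.join "" (a :: t) = a ++ PySem.Str.join "" t := by
  apply String.toList_inj.mp
  have h : ∀ (x : List Char) (ts : List (List Char)),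
      PySem.Chars.join [] (x :: ts) = x ++ PySem.Chars.join [] ts := by
    intro x ts
    induction ts <;> simp_all [PySem.Chars.join, List.intercalate]
  simp [PySem.Str.toList_join, h]

-- ''.join(a ++ b) = ''.join(a) ++ ''.join(b)
theorem join_empty_append (a b : List String) :
    PySem.Str.join "" (a ++ b) = PySem.Str.join "" a ++ PySem.Str.join "" b := by
  induction a with
  | nil =>
      apply String.toList_inj.mp
      simp [PySem.Str.toList_join, PySem.Chars.join, List.intercalate]
  | cons x t ih =>
      rw [List.cons_append, join_empty_cons, join_empty_cons, ih]
      apply String.toList_inj.mp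
      simp

-- the 'res += g(x)' loop is acc ++ ''.join(map g l)
theorem foldl_append_join {α : Type} (l : List α) (g : α → String) (acc : String) :
    l.foldl (fun res x => res ++ g x) acc = acc ++ PySem.Str.join "" (l.map g) := by
  induction l generalizing acc with
  | nil =>
      apply String.toList_inj.mp
      simp [PySem.Str.toList_join, PySem.Chars.join, List.intercalate]
  | cons x t ih =>
      simp only [List.foldl_cons, List.map_cons, join_empty_cons, ih]
      apply String.toList_inj.mp
      simp

-- A's result as ''.join of one string piece per index
theorem smart_print_eq_join (lst : List Int) (pos : Int) :
    smart_print lst pos =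
      PySem.Str.join "" ((List.range lst.length).map
        (fun (k : Nat) => if (k : Int) = pos then
            "\x1b[31m" ++ PySem.Int.toStr (lst.getD k 0) ++ "\x1b[0m"
          else
            PySem.Int.toStr (lst.getD k 0))) := by
  unfold smart_print
  have hbody :
      (fun (res : String) (i : Int) =>
        if i = pos then
          res ++ ("\x1b[31m" ++ PySem.Int.toStr (PySem.List.pyGetD lst i 0) ++ "\x1b[0m")
        else
          res ++ PySem.Int.toStr (PySem.List.pyGetD lst i 0))
      = (fun (res : String) (i : Int) => res ++
          (if i = pos then
            "\x1b[31m" ++ PySem.Int.toStr (PySem.List.pyGetD lst i 0) ++ "\x1b[0m"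
          else
            PySem.Int.toStr (PySem.List.pyGetD lst i 0))) := by
    funext res i
    by_cases h : i = pos <;> simp [h]
  rw [hbody, foldl_append_join]
  have hempty : ∀ s : String, "" ++ s = s := fun s => by
    apply String.toList_inj.mp; simp
  rw [hempty, PySem.List.pyRange_one]
  simp only [Int.sub_zero, Int.toNat_natCast, List.map_map]
  congr 1
  apply List.map_congr_left
  intro k _
  simp [PySem.List.pyGetD_natCast]

theorem smart_print_spec_aux (lst : List Int) (pos : Int) :
    smart_print lst pos = smart_print_alt lst pos := by
  rw [smart_print_eq_join]
  unfold smart_print_alt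
  set g : Nat → String := fun k =>
      if (k : Int) = pos then
        "\x1b[31m" ++ PySem.Int.toStr (lst.getD k 0) ++ "\x1b[0m"
      else
        PySem.Int.toStr (lst.getD k 0) with hg
  by_cases hguard : 0 ≤ pos ∧ pos < (lst.length : Int)
  · rw [if_pos hguard]
    obtain ⟨h0, h1⟩ := hguard
    set p := pos.toNat with hp
    have hpos : pos = (p : Int) := by omega
    have hplen : p < lst.length := by omega
    -- split range(len) at p and p+1
    have hsplit : List.range lst.length
        = List.range p ++ ((List.range (lst.length - p)).map (fun i => p + i)) := by
      rw [← List.range_add]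
      congr 1
      omega
    have hsucc : lst.length - p = (lst.length - p - 1) + 1 := by omega
    rw [hsplit, hsucc, List.range_succ_eq_map]
    simp only [List.map_append, List.map_cons, List.map_map, join_empty_append, join_empty_cons]
    have hfst : (List.range p).map g = (lst.take p).map PySem.Int.toStr := by
      apply List.ext_getElem
      · simp; omega
      · intro k hk hk'
        have hkp : k < p := by simpa using hk
        have hkl : k < lst.length := by omega
        simp only [List.getElem_map, List.getElem_range, List.getElem_take, hg]
        rw [if_neg (by omega : ¬ (k : Int) = pos)]
        simp [List.getD, hkl]
    have hmid : g (p + 0) = "\x1b[31m" ++ PySem.Int.toStr (PySem.List.pyGetD lst pos 0) ++ "\x1b[0m" := by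
      simp only [hg, Nat.add_zero]
      rw [if_pos (by omega : (p : Int) = pos), hpos, PySem.List.pyGetD_natCast]
    have hlast : (List.range (lst.length - p - 1)).map (g ∘ (fun i => p + i) ∘ Nat.succ)
        = (lst.drop (p + 1)).map PySem.Int.toStr := by
      apply List.ext_getElem
      · simp; omega
      · intro k hk hk'
        have hkb : k < lst.length - p - 1 := by simpa using hk
        have hkl : p + 1 + k < lst.length := by omega
        simp only [List.getElem_map, List.getElem_range, List.getElem_drop, Function.comp_apply, hg]
        rw [if_neg (by omega : ¬ ((p + Nat.succ k : Nat) : Int) = pos)]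
        have : p + Nat.succ k = p + 1 + k := by omega
        rw [this]
        simp [List.getD, hkl]
    rw [hfst, hmid, hlast]
    have hs1 : PySem.List.slice lst none (some pos) = lst.take p := by
      rw [PySem.List.slice_to lst h0]
    have hs2 : PySem.List.slice lst (some (pos + 1)) none = lst.drop (p + 1) := by
      rw [PySem.List.slice_from lst (by omega : (0:Int) ≤ pos + 1)]
      congr 1
      omega
    rw [hs1, hs2]
    apply String.toList_inj.mp
    simp
  · rw [if_neg hguard]
    congr 1
    apply List.ext_getElem
    · simp
    · intro k hk hk'
      have hkl : k < lst.length := by simpa using hk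
      simp only [List.getElem_map, List.getElem_range, hg]
      rw [if_neg (by simp only [not_and, not_lt] at hguard; omega : ¬ (k : Int) = pos)]
      simp [List.getD, hkl]

-- ===== VERDICT (by name: the statement is the Claim_ definition above) =====
theorem smart_print_spec : Claim_equal_smart_print := by
  intro lst pos _
  exact smart_print_spec_aux lst pos
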